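-- pv_equiv track=rewrite | github.com/slalit360/scalar_practice | DSA/Subsequence_subset/sum_of_sub_seq.py | sum_of_all_sub_seq_naive
-- ===== SOURCE A (Python) =====
-- def sum_of_all_sub_seq_naive(A):
--     # find sum of all sub sequences
--     # TC : O(n * 2^n)
--     ans = 0
--     n = len(A)
--     for i in range(1 << n):
--         summ = 0
--         for j in range(n):
--             if i & (1 << j):
--                 summ += A[j]
--         ans += summ
--     return ans
-- ===== SOURCE B (Python) =====
-- def sum_of_all_sub_seq_naive(A):
--     # Each element appears in exactly 2^(n-1) of the 2^n subsequences.
--     return (sum(A) << (len(A) - 1)) if A else 0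
-- ===== Notes on version B (the rewrite author's own statement) =====
-- stated objective: faster
-- what changed: Replaces the enumeration of all 2^n bitmask subsequences with the closed form sum(A)*2^(n-1), since each element occurs in exactly half of the subsequences.
import Mathlib
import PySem

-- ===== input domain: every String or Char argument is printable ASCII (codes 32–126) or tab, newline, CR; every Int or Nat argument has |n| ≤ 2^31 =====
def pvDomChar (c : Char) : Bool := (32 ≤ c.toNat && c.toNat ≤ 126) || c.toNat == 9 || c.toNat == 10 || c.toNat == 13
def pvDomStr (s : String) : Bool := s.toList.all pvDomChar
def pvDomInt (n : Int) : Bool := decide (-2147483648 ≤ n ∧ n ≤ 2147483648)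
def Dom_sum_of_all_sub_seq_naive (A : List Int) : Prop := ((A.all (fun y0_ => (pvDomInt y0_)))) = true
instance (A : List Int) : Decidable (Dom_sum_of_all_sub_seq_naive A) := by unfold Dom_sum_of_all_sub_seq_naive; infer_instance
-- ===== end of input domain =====

-- B replaces A's enumeration of all 2^n bitmasks by the closed form sum(A)·2^(n-1) (each
-- element lies in exactly half of the subsequences); objective: faster (O(n) vs O(n·2^n)).

-- ===== PORT A =====
-- Loop counters i, j are nonnegative Python ints, ported as Nat via List.range;
-- A[j] with 0 ≤ j < len(A) is exact as A.getD j 0 (never out of range).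
def sum_of_all_sub_seq_naive (A : List Int) : Int :=
  let n := A.length
  (List.range (1 <<< n)).foldl (fun ans i =>
    ans + (List.range n).foldl (fun summ j =>
      if i &&& (1 <<< j) ≠ 0 then summ + A.getD j 0 else summ) 0) 0

-- ===== PORT B =====
-- Source B's 'sum(A) << (len(A) - 1)' is an exact shift: ported as multiplication by 2^(len-1).
def sum_of_all_sub_seq_naive_alt (A : List Int) : Int :=
  if A = [] then 0 else A.sum * 2 ^ (A.length - 1)

-- ===== PRECONDITION & SPEC =====
def Spec_sum_of_all_sub_seq_naive (A : List Int) (out : Int) : Prop := out = sum_of_all_sub_seq_naive_alt A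
instance (A : List Int) (out : Int) : Decidable (Spec_sum_of_all_sub_seq_naive A out) := by unfold Spec_sum_of_all_sub_seq_naive; infer_instance

-- ===== CLAIM (what is proved, stated in full; the proofs are below) =====
def Claim_equal_sum_of_all_sub_seq_naive : Prop := ∀ (A : List Int), Dom_sum_of_all_sub_seq_naive A → Spec_sum_of_all_sub_seq_naive A (sum_of_all_sub_seq_naive A)

-- ===== LEMMAS AND PROOFS =====

-- a foldl that only adds is the sum of a map
theorem pv_foldl_add {β : Type} (g : β → Int) (l : List β) (s : Int) :
    l.foldl (fun a b => a + g b) s = s + (l.map g).sum := by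
  induction l generalizing s with
  | nil => simp
  | cons x xs ih => simp [ih, add_assoc]

-- the inner loop of A, as a sum over testBit
def pvInner (A : List Int) (i : Nat) : Int :=
  ((List.range A.length).map (fun j => if i.testBit j then A.getD j 0 else 0)).sum

theorem pv_inner_eq (A : List Int) (i : Nat) :
    (List.range A.length).foldl (fun summ j =>
      if i &&& (1 <<< j) ≠ 0 then summ + A.getD j 0 else summ) 0 = pvInner A i := by
  have h : ∀ (l : List Nat) (s : Int),
      l.foldl (fun summ j => if i &&& (1 <<< j) ≠ 0 then summ + A.getD j 0 else summ) s
        = l.foldl (fun summ j => summ + (if i.testBit j then A.getD j 0 else 0)) s := by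
    intro l
    induction l with
    | nil => intro s; rfl
    | cons x xs ih =>
      intro s
      have hx : (i &&& (1 <<< x) ≠ 0) ↔ i.testBit x = true := by
        rw [Nat.one_shiftLeft, Nat.and_two_pow]
        cases i.testBit x <;> simp
      simp only [List.foldl_cons, ih]
      by_cases hc : i.testBit x = true
      · rw [if_pos (hx.mpr hc), if_pos hc]
      · rw [if_neg (fun h => hc (hx.mp h)), if_neg hc, add_zero]
  rw [h, pv_foldl_add]
  simp [pvInner]

theorem pv_sum_map_add_const (g : Nat → Int) (l : List Nat) (a : Int) :
    (l.map (fun i => g i + a)).sum = (l.map g).sum + (l.length : Int) * a := by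
  induction l with
  | nil => simp
  | cons x xs ih => simp [ih]; ring

-- main closed form: the sum of pvInner over all bitmasks
theorem pv_main (A : List Int) :
    ((List.range (2 ^ A.length)).map (pvInner A)).sum = A.sum * 2 ^ (A.length - 1) := by
  induction A using List.reverseRecOn with
  | nil => simp [pvInner]
  | append_singleton A a ih =>
    have hlen : (A ++ [a]).length = A.length + 1 := by simp
    have hpow : 2 ^ (A.length + 1) = 2 ^ A.length + 2 ^ A.length := by ring
    have hlow : ∀ i ∈ List.range (2 ^ A.length), pvInner (A ++ [a]) i = pvInner A i := by
      intro i hi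
      rw [List.mem_range] at hi
      have hbit : i.testBit A.length = false := Nat.testBit_eq_false_of_lt hi
      simp only [pvInner, hlen, List.range_succ, List.map_append, List.sum_append,
        List.map_cons, List.map_nil, hbit]
      have h : ∀ j ∈ List.range A.length, (if i.testBit j then (A ++ [a]).getD j 0 else 0)
          = (if i.testBit j then A.getD j 0 else 0) := by
        intro j hj
        rw [List.mem_range] at hj
        rw [List.getD_append _ _ _ _ hj]
      rw [List.map_congr_left h]
      simp
    have hhigh : ∀ i ∈ List.range (2 ^ A.length),
        pvInner (A ++ [a]) (2 ^ A.length + i) = pvInner A i + a := by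
      intro i hi
      rw [List.mem_range] at hi
      have hbitn : (2 ^ A.length + i).testBit A.length = true := by
        rw [Nat.testBit_two_pow_add_eq, Nat.testBit_eq_false_of_lt hi]; rfl
      simp only [pvInner, hlen, List.range_succ, List.map_append, List.sum_append,
        List.map_cons, List.map_nil, hbitn]
      have h : ∀ j ∈ List.range A.length,
          ((if (2 ^ A.length + i).testBit j then (A ++ [a]).getD j 0 else 0) : Int)
          = (if i.testBit j then A.getD j 0 else 0) := by
        intro j hj
        rw [List.mem_range] at hj
        rw [Nat.testBit_two_pow_add_gt hj, List.getD_append _ _ _ _ hj]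
      rw [List.map_congr_left h]
      simp
    rw [hlen, hpow, List.range_add, List.map_append, List.sum_append,
      List.map_congr_left hlow]
    have hmap2 : ((List.range (2 ^ A.length)).map (fun i => 2 ^ A.length + i)).map
          (pvInner (A ++ [a]))
        = (List.range (2 ^ A.length)).map (fun i => pvInner A i + a) := by
      rw [List.map_map]
      exact List.map_congr_left (fun i hi => hhigh i hi)
    rw [hmap2, pv_sum_map_add_const, ih]
    simp only [List.length_range, List.sum_append, List.sum_cons, List.sum_nil,
      Nat.add_sub_cancel]
    push_cast
    by_cases hA : A = []
    · simp [hA]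
    · have hn1 : 1 ≤ A.length := List.length_pos_iff.mpr hA
      have h2 : (2 : Int) ^ (A.length - 1) * 2 = 2 ^ A.length := by
        rw [← pow_succ, Nat.sub_add_cancel hn1]
      rw [← h2]
      ring

-- ===== VERDICT (by name: the statement is the Claim_ definition above) =====
theorem sum_of_all_sub_seq_naive_spec : Claim_equal_sum_of_all_sub_seq_naive := by
  intro A _
  unfold Spec_sum_of_all_sub_seq_naive
  have houter : sum_of_all_sub_seq_naive A
      = ((List.range (1 <<< A.length)).map (fun i => pvInner A i)).sum := by
    unfold sum_of_all_sub_seq_naive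
    rw [pv_foldl_add]
    rw [List.map_congr_left (fun i _ => pv_inner_eq A i)]
    simp
  rw [houter, Nat.one_shiftLeft, pv_main]
  unfold sum_of_all_sub_seq_naive_alt
  cases A <;> simp
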